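-- pv_equiv track=rewrite | github.com/5uperb0y/rosalind | code/sign/sign.py | slperm
-- ===== SOURCE A (Python) =====
-- def slperm(l):
--     """permutations of a numberic list, including -/+ of each number.
--     """
--     if len(l) == 1:
--         return [[l[0]], [-l[0]]]
--     else:
--         return [
--             p + [sign_e]
--             for i, e in enumerate(l)
--             for p in slperm(l[:i] + l[i+1:])
--             for sign_e in [e, -e]
--         ]
-- ===== SOURCE B (Python) =====
-- def slperm(l):
--     """permutations of a numberic list, including -/+ of each number."""
--
--     def perms(xs):
--         # all permutations of xs, lexicographic by index (itertools order)
--         if len(xs) <= 1: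
--             return [list(xs)]
--         out = []
--         for i in range(len(xs)):
--             for rest in perms(xs[:i] + xs[i + 1:]):
--                 out.append([xs[i]] + rest)
--         return out
--
--     def signings(q):
--         # every +/- variant of q, leftmost sign varying slowest
--         rows = [[]]
--         for v in q:
--             rows = [row + [w] for row in rows for w in (v, -v)]
--         return rows
--
--     return [row for q in perms(l) for row in signings(q[::-1])]
-- ===== Notes on version B (the rewrite author's own statement) =====
-- stated objective: alternative
-- what changed: A interleaves sign generation into one recursive comprehension that appends the signed element last; B decomposes the task into a plain permutation generator (prepending, itertools order) plus an iterative fold that expands each reversed permutation into its sign variants.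
-- intended difference: On the empty list A returns [] because its recursion lacks a 0-length base case, while B returns [[]], the single (empty) signed permutation, which is the intended value. — e.g. on slperm([]): A returns [], B returns [[]]
import Mathlib
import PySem

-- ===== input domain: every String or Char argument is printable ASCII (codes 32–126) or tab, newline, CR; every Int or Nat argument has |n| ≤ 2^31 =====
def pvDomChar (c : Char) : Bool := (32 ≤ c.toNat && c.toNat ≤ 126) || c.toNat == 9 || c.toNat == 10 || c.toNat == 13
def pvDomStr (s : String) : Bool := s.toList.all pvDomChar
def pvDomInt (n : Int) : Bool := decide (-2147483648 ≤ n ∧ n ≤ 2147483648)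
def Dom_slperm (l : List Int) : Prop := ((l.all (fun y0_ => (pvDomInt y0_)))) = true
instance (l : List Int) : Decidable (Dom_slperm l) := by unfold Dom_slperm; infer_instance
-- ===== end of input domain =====

-- B re-decomposes A's single sign-interleaving recursion into a permutation generator plus an
-- iterative sign fold; on the empty list A returns [] (no 0-length base case) while B returns [[]],
-- the intended single empty signed permutation (see D_slperm).

-- Both ports remove element i via Python's 'xs[:i] + xs[i+1:]'; this lemma justifies termination.
theorem pvRemLenLt (xs : List Int) (k : Nat) (hk : k < xs.length) :
    (PySem.List.slice xs none (some (k : Int)) ++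
      PySem.List.slice xs (some ((k : Int) + 1)) none).length < xs.length := by
  have h1 : ((k : Int) + 1) = ((k + 1 : Nat) : Int) := by push_cast; ring
  rw [PySem.List.slice_to_natCast, h1, PySem.List.slice_from_natCast]
  simp only [List.length_append, List.length_take, List.length_drop]
  omega

-- ===== PORT A =====
def slperm (l : List Int) : List (List Int) :=
  if l.length = 1 then
    -- l[0]: the length is 1 in this branch, so Python's l[0] cannot raise; headI is exact here
    [[l.headI], [-l.headI]]
  else
    (PySem.List.enumerate l).attach.flatMap (fun ie =>
      (slperm (PySem.List.slice l none (some ie.1.1) ++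
               PySem.List.slice l (some (ie.1.1 + 1)) none)).flatMap (fun p =>
        [ie.1.2, -ie.1.2].map (fun se => p ++ [se])))
termination_by l.length
decreasing_by
  have hmem := ie.2
  rw [PySem.List.mem_enumerate_iff] at hmem
  obtain ⟨k, hk, hx⟩ := hmem
  rw [hx]
  simpa using pvRemLenLt l k hk

-- ===== PORT B =====
-- all permutations of xs, lexicographic by index (itertools order)
def pvPerms (xs : List Int) : List (List Int) :=
  if PySem.List.len xs ≤ 1 then [xs]
  else
    (PySem.List.pyRange 0 (PySem.List.len xs) 1).attach.flatMap (fun i =>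
      (pvPerms (PySem.List.slice xs none (some i.1) ++
                PySem.List.slice xs (some (i.1 + 1)) none)).map (fun rest =>
        -- xs[i]: i is drawn from range(len(xs)), so it is in range and the default is unreachable
        PySem.List.pyGetD xs i.1 0 :: rest))
termination_by xs.length
decreasing_by
  have hmem := i.2
  rw [PySem.List.mem_pyRange_one] at hmem
  obtain ⟨h0, hlt⟩ := hmem
  have hi : i.1 = ((i.1.toNat : Nat) : Int) := by omega
  rw [hi]
  have hk : i.1.toNat < xs.length := by simp only [PySem.List.len] at hlt; omega
  simpa using pvRemLenLt xs i.1.toNat hk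

-- every +/- variant of q, leftmost sign varying slowest
def pvSignings (q : List Int) : List (List Int) :=
  q.foldl (fun rows v => rows.flatMap (fun row => [v, -v].map (fun w => row ++ [w]))) [[]]

def slperm_alt (l : List Int) : List (List Int) :=
  -- q[::-1] is q.reverse (PySem.List.slice?_none_none_neg_one)
  (pvPerms l).flatMap (fun q => pvSignings q.reverse)

-- ===== PRECONDITION & SPEC =====
-- On the empty list A returns [] because its recursion lacks a 0-length base case, while B returns
-- [[]], the single (empty) signed permutation, which is the intended value.
def D_slperm (l : List Int) : Prop := l = []
instance (l : List Int) : Decidable (D_slperm l) := by unfold D_slperm; infer_instance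

def Spec_slperm (l : List Int) (out : List (List Int)) : Prop := ¬ D_slperm l → out = slperm_alt l
instance (l : List Int) (out : List (List Int)) : Decidable (Spec_slperm l out) := by
  unfold Spec_slperm; infer_instance

def pvDiffWitness_slperm : List Int := []
def pvDiffWitnessOut_slperm : (List (List Int)) × (List (List Int)) := ([], [[]])

-- ===== CLAIM (what is proved, stated in full; the proofs are below) =====
def Claim_unchanged_slperm : Prop := ∀ (l : List Int), Dom_slperm l → Spec_slperm l (slperm l)
def Claim_changed_slperm : Prop :=
  Dom_slperm (pvDiffWitness_slperm) ∧ D_slperm (pvDiffWitness_slperm) ∧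
  slperm (pvDiffWitness_slperm) = pvDiffWitnessOut_slperm.1 ∧
  slperm_alt (pvDiffWitness_slperm) = pvDiffWitnessOut_slperm.2 ∧
  pvDiffWitnessOut_slperm.1 ≠ pvDiffWitnessOut_slperm.2
def Claim_exact_slperm : Prop := ∀ (l : List Int), Dom_slperm l → D_slperm l → slperm l ≠ slperm_alt l

-- ===== LEMMAS AND PROOFS =====
theorem flatMap_congr_mem {α β : Type} {xs : List α} {f g : α → List β}
    (h : ∀ a ∈ xs, f a = g a) : xs.flatMap f = xs.flatMap g := by
  induction xs with
  | nil => rfl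
  | cons a t ih =>
    simp only [List.flatMap_cons]
    rw [h a (by simp), ih (fun b hb => h b (by simp [hb]))]

theorem signings_append (q : List Int) (e : Int) :
    pvSignings (q ++ [e]) = (pvSignings q).flatMap (fun p => [p ++ [e], p ++ [-e]]) := by
  simp [pvSignings, List.foldl_append]

theorem slperm_eq_alt_aux :
    ∀ (n : Nat) (l : List Int), l.length = n → l ≠ [] →
      slperm l = (pvPerms l).flatMap (fun q => pvSignings q.reverse) := by
  intro n
  induction n using Nat.strong_induction_on with
  | _ n IH =>
    intro l hlen hne
    by_cases h1 : l.length = 1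
    · -- l = [a]
      match l, h1 with
      | [a], _ =>
        rw [slperm.eq_def, pvPerms.eq_def]
        simp [pvSignings, PySem.List.len]
    · have h0 : l.length ≠ 0 := fun hc => hne (List.eq_nil_of_length_eq_zero hc)
      have hn2 : 2 ≤ l.length := by omega
      rw [slperm.eq_def, if_neg h1, pvPerms.eq_def, if_neg (by simp only [PySem.List.len]; omega)]
      simp only [List.flatMap_subtype, List.unattach_attach]
      rw [PySem.List.enumerate_eq_map_pyRange l 0, List.flatMap_map, List.flatMap_assoc]
      apply flatMap_congr_mem
      intro j hj
      have hj' := hj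
      rw [PySem.List.mem_pyRange_one] at hj'
      obtain ⟨hj0, hjlt⟩ := hj'
      have hjlt' : j.toNat < l.length := by simp only [PySem.List.len] at hjlt; omega
      have hrem :
          (PySem.List.slice l none (some j) ++
            PySem.List.slice l (some (j + 1)) none).length = l.length - 1 := by
        have hj' : j = ((j.toNat : Nat) : Int) := by omega
        rw [hj']
        have h1' : ((j.toNat : Int) + 1) = ((j.toNat + 1 : Nat) : Int) := by push_cast; ring
        rw [PySem.List.slice_to_natCast, h1', PySem.List.slice_from_natCast]
        simp only [List.length_append, List.length_take, List.length_drop]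
        omega
      have hremne :
          (PySem.List.slice l none (some j) ++
            PySem.List.slice l (some (j + 1)) none) ≠ [] := by
        intro hc
        rw [hc] at hrem
        simp at hrem
        omega
      rw [IH (l.length - 1) (by omega) _ hrem hremne]
      rw [List.flatMap_assoc, List.flatMap_map]
      apply flatMap_congr_mem
      intro q _
      rw [List.reverse_cons, signings_append]
      simp

-- ===== VERDICT (by name: the statement is the Claim_ definition above) =====
theorem slperm_spec : Claim_unchanged_slperm := by
  intro l _ hD
  exact slperm_eq_alt_aux l.length l rfl hD

theorem slperm_changed : Claim_changed_slperm := by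
  unfold Claim_changed_slperm
  refine ⟨by decide, rfl, ?_, ?_, by decide⟩
  · rw [pvDiffWitness_slperm, slperm.eq_def]
    simp [pvDiffWitnessOut_slperm]
  · rw [pvDiffWitness_slperm, slperm_alt, pvPerms.eq_def]
    simp [pvSignings, PySem.List.len, pvDiffWitnessOut_slperm]

theorem slperm_tight : Claim_exact_slperm := by
  intro l _ hD
  subst hD
  have hA : slperm [] = [] := by rw [slperm.eq_def]; simp
  have hB : slperm_alt [] = [[]] := by
    rw [slperm_alt, pvPerms.eq_def]
    simp [pvSignings, PySem.List.len]
  rw [hA, hB]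
  decide
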